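-- pv_equiv track=rewrite | github.com/guilmainlouiss-max/foncier-agricole | backend/main.py | analyser_plu
-- ===== SOURCE A (Python) =====
-- TYPES_PROJETS = {
--     "plein_sol": {"label": "Culture en plein sol", "icone": "🌱", "description": "Cultures directement dans le sol en place"},
--     "bac": {"label": "Culture en bac / hors-sol", "icone": "📦", "description": "Cultures sur substrat isolé du sol (bacs, containers, tables de culture)"},
--     "toiture": {"label": "Toiture / rooftop", "icone": "🏗️", "description": "Agriculture sur toit-terrasse ou toiture accessible"},
--     "serre": {"label": "Serre chauffée", "icone": "🌿", "description": "Production sous serre avec apport de chaleur"},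
--     "facade": {"label": "Mur végétal / façade", "icone": "🧱", "description": "Végétalisation de façade ou mur végétal productif"},
-- }
--
-- def analyser_plu(type_zone: str, libelle: str) -> dict:
--     z = type_zone.upper()
--     impacts = {}
--     if z.startswith("N"):
--         impacts["plein_sol"] = {"niveau": "ok", "texte": f"Zone {z} — Agriculture en plein sol autorisée"}
--         impacts["bac"] = {"niveau": "ok", "texte": f"Zone {z} — Culture en bac généralement autorisée"}
--         impacts["toiture"] = {"niveau": "danger", "texte": f"Zone {z} — Constructions en toiture très limitées"}
--         impacts["serre"] = {"niveau": "warn", "texte": f"Zone {z} — Serre soumise à autorisation spéciale"}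
--         impacts["facade"] = {"niveau": "warn", "texte": f"Zone {z} — Végétalisation façade à vérifier"}
--     elif z.startswith("A") and not z.startswith("AU"):
--         for k in TYPES_PROJETS:
--             impacts[k] = {"niveau": "ok", "texte": f"Zone agricole ({z}) — Usage agricole autorisé par nature"}
--     elif z.startswith("AU"):
--         for k in TYPES_PROJETS:
--             impacts[k] = {"niveau": "warn", "texte": f"Zone à urbaniser ({z}) — Règlement en cours, consulter la mairie"}
--     elif z in ("UA", "UB", "UC", "UD", "UM", "U"):
--         impacts["plein_sol"] = {"niveau": "warn", "texte": f"Zone urbaine ({z}) — Agriculture en sol à vérifier selon règlement local"}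
--         impacts["bac"] = {"niveau": "ok", "texte": f"Zone urbaine ({z}) — Culture en bac généralement compatible"}
--         impacts["toiture"] = {"niveau": "ok", "texte": f"Zone urbaine ({z}) — Toiture agricole généralement compatible"}
--         impacts["serre"] = {"niveau": "ok", "texte": f"Zone urbaine ({z}) — Serre en toiture à vérifier (surcharge)"}
--         impacts["facade"] = {"niveau": "ok", "texte": f"Zone urbaine ({z}) — Mur végétal généralement autorisé"}
--     elif z in ("UE", "UI", "UX", "UZ"):
--         impacts["plein_sol"] = {"niveau": "danger", "texte": f"Zone économique ({z}) — Usage agricole au sol généralement interdit"}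
--         impacts["bac"] = {"niveau": "warn", "texte": f"Zone économique ({z}) — À vérifier selon règlement"}
--         impacts["toiture"] = {"niveau": "ok", "texte": f"Zone économique ({z}) — Toiture agricole souvent possible"}
--         impacts["serre"] = {"niveau": "warn", "texte": f"Zone économique ({z}) — Serre à vérifier"}
--         impacts["facade"] = {"niveau": "ok", "texte": f"Zone économique ({z}) — Façade généralement possible"}
--     else:
--         for k in TYPES_PROJETS:
--             impacts[k] = {"niveau": "warn", "texte": f"Zone {z} — Consulter le règlement local"}
--     return impacts
-- ===== SOURCE B (Python) =====
-- TYPES_PROJETS = {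
--     "plein_sol": {"label": "Culture en plein sol", "icone": "🌱", "description": "Cultures directement dans le sol en place"},
--     "bac": {"label": "Culture en bac / hors-sol", "icone": "📦", "description": "Cultures sur substrat isolé du sol (bacs, containers, tables de culture)"},
--     "toiture": {"label": "Toiture / rooftop", "icone": "🏗️", "description": "Agriculture sur toit-terrasse ou toiture accessible"},
--     "serre": {"label": "Serre chauffée", "icone": "🌿", "description": "Production sous serre avec apport de chaleur"},
--     "facade": {"label": "Mur végétal / façade", "icone": "🧱", "description": "Végétalisation de façade ou mur végétal productif"},
-- }
--
-- # texte = PREFIX[cat][0] + z + PREFIX[cat][1] + suffix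
-- _PREFIX = {
--     "N": ("Zone ", " — "),
--     "A": ("Zone agricole (", ") — "),
--     "AU": ("Zone à urbaniser (", ") — "),
--     "URBAIN": ("Zone urbaine (", ") — "),
--     "ECO": ("Zone économique (", ") — "),
--     "AUTRE": ("Zone ", " — "),
-- }
--
-- # categories with one uniform (niveau, suffix) for all five project types
-- _UNIFORM = {
--     "A": ("ok", "Usage agricole autorisé par nature"),
--     "AU": ("warn", "Règlement en cours, consulter la mairie"),
--     "AUTRE": ("warn", "Consulter le règlement local"),
-- }
--
-- # categories with an explicit per-key (key, niveau, suffix) row list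
-- _PER_KEY = {
--     "N": [
--         ("plein_sol", "ok", "Agriculture en plein sol autorisée"),
--         ("bac", "ok", "Culture en bac généralement autorisée"),
--         ("toiture", "danger", "Constructions en toiture très limitées"),
--         ("serre", "warn", "Serre soumise à autorisation spéciale"),
--         ("facade", "warn", "Végétalisation façade à vérifier"),
--     ],
--     "URBAIN": [
--         ("plein_sol", "warn", "Agriculture en sol à vérifier selon règlement local"),
--         ("bac", "ok", "Culture en bac généralement compatible"),
--         ("toiture", "ok", "Toiture agricole généralement compatible"),
--         ("serre", "ok", "Serre en toiture à vérifier (surcharge)"),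
--         ("facade", "ok", "Mur végétal généralement autorisé"),
--     ],
--     "ECO": [
--         ("plein_sol", "danger", "Usage agricole au sol généralement interdit"),
--         ("bac", "warn", "À vérifier selon règlement"),
--         ("toiture", "ok", "Toiture agricole souvent possible"),
--         ("serre", "warn", "Serre à vérifier"),
--         ("facade", "ok", "Façade généralement possible"),
--     ],
-- }
--
-- def _categorie(z):
--     if z.startswith("N"):
--         return "N"
--     if z.startswith("AU"):
--         return "AU"
--     if z.startswith("A"):
--         return "A"
--     if z in ("UA", "UB", "UC", "UD", "UM", "U"):
--         return "URBAIN"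
--     if z in ("UE", "UI", "UX", "UZ"):
--         return "ECO"
--     return "AUTRE"
--
-- def analyser_plu(type_zone: str, libelle: str) -> dict:
--     z = type_zone.upper()
--     cat = _categorie(z)
--     if cat in _UNIFORM:
--         niveau, suffix = _UNIFORM[cat]
--         rows = [(k, niveau, suffix) for k in TYPES_PROJETS]
--     else:
--         rows = _PER_KEY[cat]
--     pre, post = _PREFIX[cat]
--     return {k: {"niveau": n, "texte": pre + z + post + s} for k, n, s in rows}
-- ===== Notes on version B (the rewrite author's own statement) =====
-- stated objective: alternative
-- what changed: Replaced the if/elif chain with inline dict literals by a classification step (one category label) plus static tables (per-category prefix, uniform or per-key rows) and a single emission loop that interpolates z at the end.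
import Mathlib
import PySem

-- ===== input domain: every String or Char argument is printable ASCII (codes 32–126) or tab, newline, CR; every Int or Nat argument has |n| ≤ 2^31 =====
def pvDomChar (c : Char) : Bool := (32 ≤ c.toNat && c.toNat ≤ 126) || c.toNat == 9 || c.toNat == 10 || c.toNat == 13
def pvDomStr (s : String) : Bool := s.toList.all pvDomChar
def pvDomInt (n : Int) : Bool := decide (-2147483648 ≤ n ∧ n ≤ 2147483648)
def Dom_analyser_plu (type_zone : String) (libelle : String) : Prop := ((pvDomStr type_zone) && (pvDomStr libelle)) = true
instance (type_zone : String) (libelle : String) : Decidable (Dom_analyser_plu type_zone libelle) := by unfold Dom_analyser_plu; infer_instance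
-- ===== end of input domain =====

-- B restructures A's if/elif-with-inline-literals into classify-then-table-then-emit (objective: alternative; same cost).

-- ===== PORT A =====
-- the keys of TYPES_PROJETS, in insertion order (only the keys are used by analyser_plu)
def pvTypesProjets : List String := ["plein_sol", "bac", "toiture", "serre", "facade"]

-- every dict insert in A targets a fresh key, so the dict's items are the inserts in program order
def analyser_plu (type_zone : String) (libelle : String) : List (String × List (String × String)) :=
  let z := PySem.Str.upper type_zone
  if PySem.Str.startswith z "N" then
    [ ("plein_sol", [("niveau", "ok"), ("texte", "Zone " ++ z ++ " — Agriculture en plein sol autorisée")]),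
      ("bac", [("niveau", "ok"), ("texte", "Zone " ++ z ++ " — Culture en bac généralement autorisée")]),
      ("toiture", [("niveau", "danger"), ("texte", "Zone " ++ z ++ " — Constructions en toiture très limitées")]),
      ("serre", [("niveau", "warn"), ("texte", "Zone " ++ z ++ " — Serre soumise à autorisation spéciale")]),
      ("facade", [("niveau", "warn"), ("texte", "Zone " ++ z ++ " — Végétalisation façade à vérifier")]) ]
  else if PySem.Str.startswith z "A" && !(PySem.Str.startswith z "AU") then
    pvTypesProjets.map (fun k => (k, [("niveau", "ok"), ("texte", "Zone agricole (" ++ z ++ ") — Usage agricole autorisé par nature")]))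
  else if PySem.Str.startswith z "AU" then
    pvTypesProjets.map (fun k => (k, [("niveau", "warn"), ("texte", "Zone à urbaniser (" ++ z ++ ") — Règlement en cours, consulter la mairie")]))
  else if ["UA", "UB", "UC", "UD", "UM", "U"].contains z then
    [ ("plein_sol", [("niveau", "warn"), ("texte", "Zone urbaine (" ++ z ++ ") — Agriculture en sol à vérifier selon règlement local")]),
      ("bac", [("niveau", "ok"), ("texte", "Zone urbaine (" ++ z ++ ") — Culture en bac généralement compatible")]),
      ("toiture", [("niveau", "ok"), ("texte", "Zone urbaine (" ++ z ++ ") — Toiture agricole généralement compatible")]),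
      ("serre", [("niveau", "ok"), ("texte", "Zone urbaine (" ++ z ++ ") — Serre en toiture à vérifier (surcharge)")]),
      ("facade", [("niveau", "ok"), ("texte", "Zone urbaine (" ++ z ++ ") — Mur végétal généralement autorisé")]) ]
  else if ["UE", "UI", "UX", "UZ"].contains z then
    [ ("plein_sol", [("niveau", "danger"), ("texte", "Zone économique (" ++ z ++ ") — Usage agricole au sol généralement interdit")]),
      ("bac", [("niveau", "warn"), ("texte", "Zone économique (" ++ z ++ ") — À vérifier selon règlement")]),
      ("toiture", [("niveau", "ok"), ("texte", "Zone économique (" ++ z ++ ") — Toiture agricole souvent possible")]),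
      ("serre", [("niveau", "warn"), ("texte", "Zone économique (" ++ z ++ ") — Serre à vérifier")]),
      ("facade", [("niveau", "ok"), ("texte", "Zone économique (" ++ z ++ ") — Façade généralement possible")]) ]
  else
    pvTypesProjets.map (fun k => (k, [("niveau", "warn"), ("texte", "Zone " ++ z ++ " — Consulter le règlement local")]))

-- ===== PORT B =====
-- texte = prefix ++ z ++ post ++ suffix, per category
def pvPrefix : PySem.Dict String (String × String) := PySem.Dict.ofList
  [ ("N", ("Zone ", " — ")), ("A", ("Zone agricole (", ") — ")), ("AU", ("Zone à urbaniser (", ") — ")),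
    ("URBAIN", ("Zone urbaine (", ") — ")), ("ECO", ("Zone économique (", ") — ")), ("AUTRE", ("Zone ", " — ")) ]

-- categories with one uniform (niveau, suffix) for all five project types
def pvUniform : PySem.Dict String (String × String) := PySem.Dict.ofList
  [ ("A", ("ok", "Usage agricole autorisé par nature")),
    ("AU", ("warn", "Règlement en cours, consulter la mairie")),
    ("AUTRE", ("warn", "Consulter le règlement local")) ]

-- categories with an explicit per-key (key, niveau, suffix) row list
def pvPerKey : PySem.Dict String (List (String × String × String)) := PySem.Dict.ofList
  [ ("N", [ ("plein_sol", "ok", "Agriculture en plein sol autorisée"),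
            ("bac", "ok", "Culture en bac généralement autorisée"),
            ("toiture", "danger", "Constructions en toiture très limitées"),
            ("serre", "warn", "Serre soumise à autorisation spéciale"),
            ("facade", "warn", "Végétalisation façade à vérifier") ]),
    ("URBAIN", [ ("plein_sol", "warn", "Agriculture en sol à vérifier selon règlement local"),
                 ("bac", "ok", "Culture en bac généralement compatible"),
                 ("toiture", "ok", "Toiture agricole généralement compatible"),
                 ("serre", "ok", "Serre en toiture à vérifier (surcharge)"),
                 ("facade", "ok", "Mur végétal généralement autorisé") ]),
    ("ECO", [ ("plein_sol", "danger", "Usage agricole au sol généralement interdit"),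
              ("bac", "warn", "À vérifier selon règlement"),
              ("toiture", "ok", "Toiture agricole souvent possible"),
              ("serre", "warn", "Serre à vérifier"),
              ("facade", "ok", "Façade généralement possible") ]) ]

def pvCategorie (z : String) : String :=
  if PySem.Str.startswith z "N" then "N"
  else if PySem.Str.startswith z "AU" then "AU"
  else if PySem.Str.startswith z "A" then "A"
  else if ["UA", "UB", "UC", "UD", "UM", "U"].contains z then "URBAIN"
  else if ["UE", "UI", "UX", "UZ"].contains z then "ECO"
  else "AUTRE"

def analyser_plu_alt (type_zone : String) (libelle : String) : List (String × List (String × String)) :=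
  let z := PySem.Str.upper type_zone
  let cat := pvCategorie z
  let rows : List (String × String × String) :=
    match pvUniform.get? cat with
    | some (niveau, suffix) => pvTypesProjets.map (fun k => (k, niveau, suffix))
    | none => pvPerKey.getD cat []
  let pre := pvPrefix.getD cat ("", "")
  rows.map (fun r => (r.1, [("niveau", r.2.1), ("texte", pre.1 ++ z ++ pre.2 ++ r.2.2)]))

-- ===== PRECONDITION & SPEC =====
def Spec_analyser_plu (type_zone : String) (libelle : String) (out : List (String × List (String × String))) : Prop := out = analyser_plu_alt type_zone libelle
instance (type_zone : String) (libelle : String) (out : List (String × List (String × String))) : Decidable (Spec_analyser_plu type_zone libelle out) := by unfold Spec_analyser_plu; infer_instance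

-- ===== CLAIM (what is proved, stated in full; the proofs are below) =====
def Claim_equal_analyser_plu : Prop := ∀ (type_zone : String) (libelle : String), Dom_analyser_plu type_zone libelle → Spec_analyser_plu type_zone libelle (analyser_plu type_zone libelle)

-- ===== LEMMAS AND PROOFS =====
theorem analyser_plu_eq (type_zone libelle : String) :
    analyser_plu type_zone libelle = analyser_plu_alt type_zone libelle := by
  unfold analyser_plu analyser_plu_alt pvCategorie
  cases hN : PySem.Chars.startswith (PySem.Chars.upper type_zone.toList) ['N'] <;>
  cases hAU : PySem.Chars.startswith (PySem.Chars.upper type_zone.toList) ['A', 'U'] <;>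
  cases hA : PySem.Chars.startswith (PySem.Chars.upper type_zone.toList) ['A'] <;>
  by_cases hU : (PySem.Str.upper type_zone = "UA" ∨ PySem.Str.upper type_zone = "UB" ∨
      PySem.Str.upper type_zone = "UC" ∨ PySem.Str.upper type_zone = "UD" ∨
      PySem.Str.upper type_zone = "UM" ∨ PySem.Str.upper type_zone = "U") <;>
  by_cases hE : (PySem.Str.upper type_zone = "UE" ∨ PySem.Str.upper type_zone = "UI" ∨
      PySem.Str.upper type_zone = "UX" ∨ PySem.Str.upper type_zone = "UZ") <;>
  simp [hN, hAU, hA, hU, hE, pvUniform, pvPerKey, pvPrefix, pvTypesProjets,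
        PySem.Dict.ofList, PySem.Dict.get?, PySem.Dict.getD, PySem.Dict.update,
        PySem.Dict.insert, PySem.Dict.empty, PySem.Dict.contains,
        List.find?, String.append_assoc]

-- ===== VERDICT (by name: the statement is the Claim_ definition above) =====
theorem analyser_plu_spec : Claim_equal_analyser_plu := by
  intro type_zone libelle _
  unfold Spec_analyser_plu
  exact analyser_plu_eq type_zone libelle
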